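-- pv_equiv track=rewrite | github.com/hy54321/DM_Helper_MCP | server/sql_guard.py | _mask_sql_literals_and_identifiers
-- ===== SOURCE A (Python) =====
-- def _mask_sql_literals_and_identifiers(sql: str) -> str:
--     """Mask quoted text with spaces so keyword scans ignore literals/identifiers."""
--     out: list[str] = []
--     in_single = False
--     in_double = False
--     i = 0
--
--     while i < len(sql):
--         ch = sql[i]
--         nxt = sql[i + 1] if i + 1 < len(sql) else ""
--
--         if in_single:
--             # Handle escaped single quote ('')
--             if ch == "'" and nxt == "'":
--                 out.append(" ")
--                 out.append(" ")
--                 i += 2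
--                 continue
--             if ch == "'":
--                 in_single = False
--             out.append(" ")
--             i += 1
--             continue
--
--         if in_double:
--             # Handle escaped double quote ("")
--             if ch == '"' and nxt == '"':
--                 out.append(" ")
--                 out.append(" ")
--                 i += 2
--                 continue
--             if ch == '"':
--                 in_double = False
--             out.append(" ")
--             i += 1
--             continue
--
--         if ch == "'":
--             in_single = True
--             out.append(" ")
--             i += 1
--             continue
--
--         if ch == '"':
--             in_double = True
--             out.append(" ")
--             i += 1
--             continue
--
--         out.append(ch)
--         i += 1
--
--     return "".join(out)
-- ===== SOURCE B (Python) =====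
-- def _mask_sql_literals_and_identifiers(sql: str) -> str:
--     """Mask quoted text with spaces; span-based: consume each quoted span in one
--     inner loop and emit a run of spaces, instead of a per-character state machine."""
--     res: list[str] = []
--     i = 0
--     n = len(sql)
--     while i < n:
--         c = sql[i]
--         if c == "'" or c == '"':
--             j = i + 1
--             while j < n:
--                 if sql[j] == c:
--                     if j + 1 < n and sql[j + 1] == c:
--                         j += 2
--                         continue
--                     j += 1
--                     break
--                 j += 1
--             res.append(" " * (j - i))
--             i = j
--         else:
--             res.append(c)
--             i += 1
--     return "".join(res)
-- ===== Notes on version B (the rewrite author's own statement) =====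
-- stated objective: faster
-- what changed: Replaced A's per-character state machine with two boolean quote flags by a span-based scan: when a quote opens, an inner loop consumes the whole quoted span (handling doubled-quote escapes and unterminated quotes) and a single run of spaces of the span's length is emitted.
import Mathlib
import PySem

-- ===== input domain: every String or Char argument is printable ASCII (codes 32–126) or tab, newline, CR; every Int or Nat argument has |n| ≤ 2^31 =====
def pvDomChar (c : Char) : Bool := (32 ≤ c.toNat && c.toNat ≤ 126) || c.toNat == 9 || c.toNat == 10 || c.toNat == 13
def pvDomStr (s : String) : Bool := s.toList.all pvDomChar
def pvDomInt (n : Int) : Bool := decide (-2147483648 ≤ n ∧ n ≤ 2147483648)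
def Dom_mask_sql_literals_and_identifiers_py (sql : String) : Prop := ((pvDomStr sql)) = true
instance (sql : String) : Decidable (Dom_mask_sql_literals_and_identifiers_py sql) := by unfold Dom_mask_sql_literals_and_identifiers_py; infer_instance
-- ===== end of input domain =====

-- B replaces A's per-character quote-state machine by a span-based scan (consume each
-- quoted span in one inner loop, emit a run of spaces); alternative structure, same cost.

-- ===== PORT A =====
-- A's while-loop over indices with the two boolean flags, as structural recursion over
-- the character list carrying the same flags; branch order follows A.
def maskA (s d : Bool) : List Char → List Char
  | [] => []
  | c :: rest =>
    if s then
      if c = '\'' then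
        match rest with
        | c' :: rest' =>
          if c' = '\'' then ' ' :: ' ' :: maskA s d rest'
          else ' ' :: maskA false d (c' :: rest')
        | [] => ' ' :: maskA false d []
      else ' ' :: maskA s d rest
    else if d then
      if c = '"' then
        match rest with
        | c' :: rest' =>
          if c' = '"' then ' ' :: ' ' :: maskA s d rest'
          else ' ' :: maskA s false (c' :: rest')
        | [] => ' ' :: maskA s false []
      else ' ' :: maskA s d rest
    else if c = '\'' then ' ' :: maskA true d rest
    else if c = '"' then ' ' :: maskA s true rest
    else c :: maskA s d rest
termination_by l => l.length

def mask_sql_literals_and_identifiers_py (sql : String) : String :=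
  String.ofList (maskA false false sql.toList)

-- ===== PORT B =====
-- B's inner loop: consume the body of a quoted span opened by q (handling doubled
-- quotes), returning the number of characters consumed and the remainder.
def consumeQ (q : Char) : List Char → Nat × List Char
  | [] => (0, [])
  | c :: rest =>
    if c = q then
      match rest with
      | c' :: rest' =>
        if c' = q then
          let p := consumeQ q rest'
          (p.1 + 2, p.2)
        else (1, c' :: rest')
      | [] => (1, [])
    else
      let p := consumeQ q rest
      (p.1 + 1, p.2)
termination_by l => l.length

theorem consumeQ_len_le_aux (q : Char) (n : Nat) :
    ∀ l : List Char, l.length ≤ n → (consumeQ q l).2.length ≤ l.length := by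
  induction n with
  | zero =>
    intro l hl
    have : l = [] := List.eq_nil_of_length_eq_zero (Nat.le_zero.mp hl)
    subst this; simp [consumeQ]
  | succ n ih =>
    intro l hl
    cases l with
    | nil => simp [consumeQ]
    | cons c rest =>
      have hrest : rest.length ≤ n := by simpa using hl
      by_cases hc : c = q
      · cases rest with
        | nil => simp [consumeQ, hc]
        | cons c' rest' =>
          by_cases hq : c' = q
          · have hr' : rest'.length ≤ n := by simp at hl; omega
            have := ih rest' hr'
            rw [consumeQ.eq_def]; simp [hc, hq]; omega
          · rw [consumeQ.eq_def]; simp [hc, hq]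
      · have := ih rest hrest
        rw [consumeQ.eq_def]; simp [hc]; omega

-- B's outer loop: copy unquoted characters, replace each quoted span by spaces.
def maskB : List Char → List Char
  | [] => []
  | c :: rest =>
    if c = '\'' ∨ c = '"' then
      let p := consumeQ c rest
      List.replicate (p.1 + 1) ' ' ++ maskB p.2
    else c :: maskB rest
termination_by l => l.length
decreasing_by
  · exact Nat.lt_succ_of_le (consumeQ_len_le_aux _ _ _ le_rfl)
  · simp

def mask_sql_literals_and_identifiers_py_alt (sql : String) : String :=
  String.ofList (maskB sql.toList)

-- ===== PRECONDITION & SPEC =====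
def Spec_mask_sql_literals_and_identifiers_py (sql : String) (out : String) : Prop := out = mask_sql_literals_and_identifiers_py_alt sql
instance (sql : String) (out : String) : Decidable (Spec_mask_sql_literals_and_identifiers_py sql out) := by unfold Spec_mask_sql_literals_and_identifiers_py; infer_instance

-- ===== CLAIM (what is proved, stated in full; the proofs are below) =====
def Claim_equal_mask_sql_literals_and_identifiers_py : Prop := ∀ (sql : String), Dom_mask_sql_literals_and_identifiers_py sql → Spec_mask_sql_literals_and_identifiers_py sql (mask_sql_literals_and_identifiers_py sql)

-- ===== LEMMAS AND PROOFS =====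

-- Combined invariant, by strong induction on the length: outside quotes A's machine
-- agrees with B's scan; inside a quote A's machine produces exactly the spaces B
-- emits for the rest of the span, followed by B on the remainder.
theorem maskA_maskB (n : Nat) : ∀ l : List Char, l.length ≤ n →
    (maskA false false l = maskB l) ∧
    (maskA true false l = List.replicate (consumeQ '\'' l).1 ' ' ++ maskB (consumeQ '\'' l).2) ∧
    (maskA false true l = List.replicate (consumeQ '"' l).1 ' ' ++ maskB (consumeQ '"' l).2) := by
  induction n with
  | zero =>
    intro l hl
    have : l = [] := List.eq_nil_of_length_eq_zero (Nat.le_zero.mp hl)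
    subst this
    simp [maskA, maskB, consumeQ]
  | succ n ih =>
    intro l hl
    cases l with
    | nil => simp [maskA, maskB, consumeQ]
    | cons c rest =>
      have hrest : rest.length ≤ n := by simpa using hl
      refine ⟨?_, ?_, ?_⟩
      · -- no flag set
        by_cases hs : c = '\''
        · subst hs
          have h1 := (ih rest hrest).2.1
          rw [maskA.eq_def]
          simp [maskB, h1, List.replicate_succ]
        · by_cases hd : c = '"'
          · subst hd
            have h2 := (ih rest hrest).2.2
            rw [maskA.eq_def]
            simp [maskB, hs, h2, List.replicate_succ]
          · have h0 := (ih rest hrest).1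
            rw [maskA.eq_def]
            simp [maskB, hs, hd, h0]
      · -- in single quote
        by_cases hc : c = '\''
        · subst hc
          cases rest with
          | nil => simp [maskA, maskB, consumeQ]
          | cons c' rest' =>
            by_cases hq : c' = '\''
            · subst hq
              have hr' : rest'.length ≤ n := by simp at hl; omega
              have h1 := (ih rest' hr').2.1
              rw [maskA.eq_def, consumeQ.eq_def]
              simp [h1, List.replicate_succ]
            · have h0 := (ih (c' :: rest') hrest).1
              rw [maskA.eq_def, consumeQ.eq_def]
              simp [hq, h0, List.replicate_succ]
        · have h1 := (ih rest hrest).2.1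
          rw [maskA.eq_def, consumeQ.eq_def]
          simp [hc, h1, List.replicate_succ]
      · -- in double quote
        by_cases hc : c = '"'
        · subst hc
          cases rest with
          | nil => simp [maskA, maskB, consumeQ]
          | cons c' rest' =>
            by_cases hq : c' = '"'
            · subst hq
              have hr' : rest'.length ≤ n := by simp at hl; omega
              have h2 := (ih rest' hr').2.2
              rw [maskA.eq_def, consumeQ.eq_def]
              simp [h2, List.replicate_succ]
            · have h0 := (ih (c' :: rest') hrest).1
              rw [maskA.eq_def, consumeQ.eq_def]
              simp [hq, h0, List.replicate_succ]
        · have h2 := (ih rest hrest).2.2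
          rw [maskA.eq_def, consumeQ.eq_def]
          simp [hc, h2, List.replicate_succ]

-- ===== VERDICT (by name: the statement is the Claim_ definition above) =====
theorem mask_sql_literals_and_identifiers_py_spec : Claim_equal_mask_sql_literals_and_identifiers_py := by
  intro sql _
  unfold Spec_mask_sql_literals_and_identifiers_py
  unfold mask_sql_literals_and_identifiers_py mask_sql_literals_and_identifiers_py_alt
  rw [(maskA_maskB sql.toList.length sql.toList le_rfl).1]
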